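-- pv_equiv track=rewrite | github.com/axelthorstein/university-projects | Old Classes/Computer Science/108/Python/findn.py | find_letter_n_times
-- ===== SOURCE A (Python) =====
-- def find_letter_n_times(s, letter, n):
--     """ str, str, int) -> str
--
--     >>> find_letter_n_times('Computer Science', 'e', 2)
--     'Computer Scie'
--     """
--
--     i = 0
--     count = 0
--     while count < n:
--         if s[i] == letter:
--             count = count + 1
--         i = i + 1
--     return s[:i]
-- ===== SOURCE B (Python) =====
-- def find_letter_n_times(s, letter, n):
--     out = []
--     for ch in s:
--         if n <= 0:
--             break
--         out.append(ch)
--         if ch == letter: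
--             n -= 1
--     return ''.join(out)
-- ===== Notes on version B (the rewrite author's own statement) =====
-- stated objective: simpler
-- what changed: Replaces A's index/count while-loop with slicing by a single for-each pass over the characters that copies them into an accumulator while counting the target letter down, joining the result.
import Mathlib
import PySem

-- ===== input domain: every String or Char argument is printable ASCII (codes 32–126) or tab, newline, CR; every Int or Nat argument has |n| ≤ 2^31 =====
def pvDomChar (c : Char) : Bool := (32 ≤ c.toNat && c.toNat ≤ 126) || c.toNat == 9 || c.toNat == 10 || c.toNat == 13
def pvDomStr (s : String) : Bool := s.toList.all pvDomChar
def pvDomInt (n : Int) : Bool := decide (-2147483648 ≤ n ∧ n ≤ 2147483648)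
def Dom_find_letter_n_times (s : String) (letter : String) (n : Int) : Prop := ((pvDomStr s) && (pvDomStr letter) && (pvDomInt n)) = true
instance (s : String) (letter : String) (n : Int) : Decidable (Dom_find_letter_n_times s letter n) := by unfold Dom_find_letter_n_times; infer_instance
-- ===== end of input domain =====

-- B replaces A's index/count while-loop + slice with a single for-each pass that copies
-- characters into an accumulator while counting the target letter down (simpler).

-- ===== PORT A =====
-- the while-loop of A: state (i, count); s[i] is pyGet? (none = IndexError, loop exits
-- there with the current i — those inputs are outside Pre_, the returned value is unclaimed)
def pvLoopA (l : List Char) (letter : List Char) (n : Int) (i : Nat) (count : Int) : Nat :=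
  if count < n then
    match h : PySem.List.pyGet? l (i : Int) with
    | none => i
    | some ch =>
      if [ch] = letter then pvLoopA l letter n (i + 1) (count + 1)
      else pvLoopA l letter n (i + 1) count
  else i
termination_by l.length - i
decreasing_by
  all_goals
    have : i < l.length := by
      by_contra hge
      simp [PySem.List.pyGet?_natCast, List.getElem?_eq_none (by omega : l.length ≤ i)] at h
    omega

def find_letter_n_times (s : String) (letter : String) (n : Int) : String :=
  PySem.Str.slice s none (some ((pvLoopA s.toList letter.toList n 0 0 : Nat) : Int))

-- ===== PORT B =====
-- B's for-loop: out accumulates the characters already copied, n counts down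
def pvLoopB (letter : List Char) : List Char → Int → List Char → List Char
  | [], _, out => out
  | ch :: rest, n, out =>
    if n ≤ 0 then out
    else pvLoopB letter rest (if [ch] = letter then n - 1 else n) (out ++ [ch])

def find_letter_n_times_alt (s : String) (letter : String) (n : Int) : String :=
  String.ofList (pvLoopB letter.toList s.toList n [])

-- ===== PRECONDITION & SPEC =====
-- Pre_ is exactly where Python A returns: n ≤ 0, or s contains at least n characters equal
-- to letter (so the while-loop reaches the nth occurrence); otherwise A raises IndexError.
def Pre_find_letter_n_times (s : String) (letter : String) (n : Int) : Prop :=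
  n ≤ 0 ∨ n ≤ (s.toList.countP (fun ch => [ch] == letter.toList) : Int)
instance (s : String) (letter : String) (n : Int) : Decidable (Pre_find_letter_n_times s letter n) := by unfold Pre_find_letter_n_times; infer_instance

def pvWitness_find_letter_n_times : String × String × Int := ("Computer Science", "e", 2)

def Spec_find_letter_n_times (s : String) (letter : String) (n : Int) (out : String) : Prop := out = find_letter_n_times_alt s letter n
instance (s : String) (letter : String) (n : Int) (out : String) : Decidable (Spec_find_letter_n_times s letter n out) := by unfold Spec_find_letter_n_times; infer_instance

-- ===== CLAIM (what is proved, stated in full; the proofs are below) =====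
def Claim_equal_find_letter_n_times : Prop := ∀ (s : String) (letter : String) (n : Int), Dom_find_letter_n_times s letter n → Pre_find_letter_n_times s letter n → Spec_find_letter_n_times s letter n (find_letter_n_times s letter n)

-- ===== LEMMAS AND PROOFS =====

-- the length of the prefix both programs produce, as one structural recursion
def pvSpecLen (l : List Char) (letter : List Char) (n : Int) : Nat :=
  match l with
  | [] => 0
  | ch :: rest => if n ≤ 0 then 0 else 1 + pvSpecLen rest letter (if [ch] = letter then n - 1 else n)

theorem pvSpecLen_nonpos (l : List Char) (letter : List Char) (n : Int) (hn : n ≤ 0) :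
    pvSpecLen l letter n = 0 := by
  cases l <;> simp [pvSpecLen, hn]

theorem pvLoopA_eq (l : List Char) (letter : List Char) (n : Int) (i : Nat) (count : Int)
    (hi : i ≤ l.length) :
    pvLoopA l letter n i count = i + pvSpecLen (l.drop i) letter (n - count) := by
  fun_induction pvLoopA l letter n i count with
  | case1 i count hlt h =>
    -- s[i] raised: i = l.length
    have : l.length ≤ i := by
      by_contra hlt'
      simp [PySem.List.pyGet?_natCast, List.getElem?_eq_getElem (by omega : i < l.length)] at h
    have : i = l.length := by omega
    subst this
    simp [List.drop_length, pvSpecLen]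
  | case2 i count hlt ch h heq ih =>
    have hilt : i < l.length := by
      by_contra hge
      simp [PySem.List.pyGet?_natCast, List.getElem?_eq_none (by omega : l.length ≤ i)] at h
    have hch : l[i] = ch := by
      simpa [PySem.List.pyGet?_natCast, List.getElem?_eq_getElem hilt] using h
    have hdrop : l.drop i = ch :: l.drop (i + 1) := by
      rw [List.drop_eq_getElem_cons hilt, hch]
    rw [ih (by omega), hdrop]
    simp [pvSpecLen, heq, show ¬ (n - count ≤ 0) by omega, show n - (count + 1) = n - count - 1 by ring]
    omega
  | case3 i count hlt ch h heq ih =>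
    have hilt : i < l.length := by
      by_contra hge
      simp [PySem.List.pyGet?_natCast, List.getElem?_eq_none (by omega : l.length ≤ i)] at h
    have hch : l[i] = ch := by
      simpa [PySem.List.pyGet?_natCast, List.getElem?_eq_getElem hilt] using h
    have hdrop : l.drop i = ch :: l.drop (i + 1) := by
      rw [List.drop_eq_getElem_cons hilt, hch]
    rw [ih (by omega), hdrop]
    simp [pvSpecLen, heq, show ¬ (n - count ≤ 0) by omega]
    omega
  | case4 i count hlt =>
    rw [pvSpecLen_nonpos _ _ _ (by omega)]
    omega

theorem pvLoopB_eq (letter : List Char) (l : List Char) (n : Int) (acc : List Char) :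
    pvLoopB letter l n acc = acc ++ l.take (pvSpecLen l letter n) := by
  induction l generalizing n acc with
  | nil => simp [pvLoopB, pvSpecLen]
  | cons ch rest ih =>
    by_cases hn : n ≤ 0
    · simp [pvLoopB, pvSpecLen, hn]
    · simp only [pvLoopB, pvSpecLen, if_neg hn, ih]
      rw [Nat.add_comm, List.take_succ_cons]
      simp

-- ===== VERDICT (by name: the statement is the Claim_ definition above) =====
theorem find_letter_n_times_spec : Claim_equal_find_letter_n_times := by
  intro s letter n _ _
  unfold Spec_find_letter_n_times find_letter_n_times find_letter_n_times_alt
  rw [pvLoopB_eq]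
  have h := pvLoopA_eq s.toList letter.toList n 0 0 (by omega)
  simp only [List.drop_zero, Int.sub_zero, Nat.zero_add] at h
  apply String.toList_inj.mp
  rw [h]
  simp [pysem]
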